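-- pv_equiv track=rewrite | github.com/micostabal/ExpressionParser | src/Utils.py | charWithDepthsIndexes
-- ===== SOURCE A (Python) =====
-- from typing import List
--
-- def charWithDepthsIndexes(sentence: str, targetChar: str, depth: int) -> List[int]:
--   currentDepth=0
--   indexes=[]
--   for index, char in enumerate(sentence):
--     if char=='(':
--       currentDepth+=1
--     elif char==")":
--       currentDepth-=1
--     elif char==targetChar and depth==currentDepth:
--       indexes.append(index)
--   return indexes
-- ===== SOURCE B (Python) =====
-- def charWithDepthsIndexes(sentence: str, targetChar: str, depth: int):
--     # Pass 1: prefix depth table (depth in effect just before each index).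
--     depths = []
--     d = 0
--     for ch in sentence:
--         depths.append(d)
--         d += (ch == '(') - (ch == ')')
--     # Pass 2: select matching indexes (parens themselves are never collected).
--     return [i for i, (ch, dep) in enumerate(zip(sentence, depths))
--             if ch not in '()' and ch == targetChar and dep == depth]
-- ===== Notes on version B (the rewrite author's own statement) =====
-- stated objective: alternative
-- what changed: Replaces the single interleaved loop carrying (currentDepth, indexes) state by two separated passes: first a prefix depth table, then a stateless comprehension selecting the matching indexes.
import Mathlib
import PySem

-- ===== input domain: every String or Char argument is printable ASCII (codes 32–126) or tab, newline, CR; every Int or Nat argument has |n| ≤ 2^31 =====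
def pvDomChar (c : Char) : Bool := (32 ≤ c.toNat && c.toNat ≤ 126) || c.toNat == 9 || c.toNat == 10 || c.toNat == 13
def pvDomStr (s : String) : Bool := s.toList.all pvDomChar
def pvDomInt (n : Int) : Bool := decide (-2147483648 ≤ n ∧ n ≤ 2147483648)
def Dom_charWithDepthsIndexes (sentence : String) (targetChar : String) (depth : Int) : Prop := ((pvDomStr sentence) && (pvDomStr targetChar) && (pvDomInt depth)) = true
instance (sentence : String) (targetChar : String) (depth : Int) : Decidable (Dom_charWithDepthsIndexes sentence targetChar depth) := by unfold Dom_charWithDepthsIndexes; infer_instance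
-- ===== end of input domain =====

-- B separates A's single stateful loop into a prefix depth table plus a stateless selection pass (alternative decomposition, same cost).

-- ===== PORT A =====
def charWithDepthsIndexes (sentence : String) (targetChar : String) (depth : Int) : List Int :=
  ((PySem.List.enumerate sentence.toList 0).foldl
      (fun (st : Int × List Int) (p : Int × Char) =>
        if p.2 = '(' then (st.1 + 1, st.2)
        else if p.2 = ')' then (st.1 - 1, st.2)
        else if [p.2] = targetChar.toList ∧ depth = st.1 then (st.1, st.2 ++ [p.1])
        else st)
      (0, [])).2

-- ===== PORT B =====
-- the loop building the prefix depth table, as structural recursion on the chars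
def depthPrefix : List Char → Int → List Int
  | [], _ => []
  | c :: cs, d => d :: depthPrefix cs (d + (if c = '(' then 1 else 0) - (if c = ')' then 1 else 0))

def charWithDepthsIndexes_alt (sentence : String) (targetChar : String) (depth : Int) : List Int :=
  (PySem.List.enumerate (sentence.toList.zip (depthPrefix sentence.toList 0)) 0).filterMap
    (fun p => if p.2.1 ≠ '(' ∧ p.2.1 ≠ ')' ∧ [p.2.1] = targetChar.toList ∧ p.2.2 = depth
              then some p.1 else none)

-- ===== PRECONDITION & SPEC =====
def Spec_charWithDepthsIndexes (sentence : String) (targetChar : String) (depth : Int) (out : List Int) : Prop := out = charWithDepthsIndexes_alt sentence targetChar depth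
instance (sentence : String) (targetChar : String) (depth : Int) (out : List Int) : Decidable (Spec_charWithDepthsIndexes sentence targetChar depth out) := by unfold Spec_charWithDepthsIndexes; infer_instance

-- ===== CLAIM (what is proved, stated in full; the proofs are below) =====
def Claim_equal_charWithDepthsIndexes : Prop := ∀ (sentence : String) (targetChar : String) (depth : Int), Dom_charWithDepthsIndexes sentence targetChar depth → Spec_charWithDepthsIndexes sentence targetChar depth (charWithDepthsIndexes sentence targetChar depth)

-- ===== LEMMAS AND PROOFS =====
lemma charWithDepthsIndexes_key (t : List Char) (depth : Int) :
    ∀ (cs : List Char) (i d : Int) (acc : List Int),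
    ((PySem.List.enumerate cs i).foldl
      (fun (st : Int × List Int) (p : Int × Char) =>
        if p.2 = '(' then (st.1 + 1, st.2)
        else if p.2 = ')' then (st.1 - 1, st.2)
        else if [p.2] = t ∧ depth = st.1 then (st.1, st.2 ++ [p.1])
        else st)
      (d, acc)).2
    = acc ++ (PySem.List.enumerate (cs.zip (depthPrefix cs d)) i).filterMap
        (fun p => if p.2.1 ≠ '(' ∧ p.2.1 ≠ ')' ∧ [p.2.1] = t ∧ p.2.2 = depth
                  then some p.1 else none) := by
  intro cs
  induction cs with
  | nil => intro i d acc; simp [PySem.List.enumerate_nil, depthPrefix]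
  | cons c cs ih =>
    intro i d acc
    simp only [depthPrefix, List.zip_cons_cons, PySem.List.enumerate_cons, List.foldl_cons,
      List.filterMap_cons]
    by_cases h1 : c = '('
    · simp [h1, ih]
    · by_cases h2 : c = ')'
      · simp [h2, ih]
      · by_cases h3 : [c] = t ∧ depth = d
        · rw [if_neg h1, if_neg h2, if_pos h3,
            if_pos (show c ≠ '(' ∧ c ≠ ')' ∧ [c] = t ∧ d = depth from ⟨h1, h2, h3.1, h3.2.symm⟩)]
          rw [ih]; simp only [if_neg h1, if_neg h2, add_zero, sub_zero]; simp
        · rw [if_neg h1, if_neg h2, if_neg h3,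
            if_neg (show ¬ (c ≠ '(' ∧ c ≠ ')' ∧ [c] = t ∧ d = depth) from
              fun h => h3 ⟨h.2.2.1, h.2.2.2.symm⟩)]
          simp only [if_neg h1, if_neg h2, add_zero, sub_zero]
          simpa using ih (i+1) d acc

-- ===== VERDICT (by name: the statement is the Claim_ definition above) =====
theorem charWithDepthsIndexes_spec : Claim_equal_charWithDepthsIndexes := by
  intro sentence targetChar depth _
  unfold Spec_charWithDepthsIndexes charWithDepthsIndexes charWithDepthsIndexes_alt
  simpa using charWithDepthsIndexes_key targetChar.toList depth sentence.toList 0 0 []
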